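-- pv_equiv track=rewrite | github.com/Star-Viper/Viper-Cipher | viper.py | zigzag_read_matrix
-- ===== SOURCE A (Python) =====
-- def zigzag_read_matrix(matrix):
--     result = ""
--     for j in range(2, -1, -1):
--         if j % 2 == 0:
--             for i in range(len(matrix)):
--                 result += matrix[i][j]
--         else:
--             for i in range(len(matrix)-1, -1, -1):
--                 result += matrix[i][j]
--     return result
-- ===== SOURCE B (Python) =====
-- def zigzag_read_matrix(matrix):
--     if not matrix:
--         return ""
--     cols = list(zip(*matrix))
--     parts = []
--     for j in (2, 1, 0):
--         column = cols[j]
--         if j % 2: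
--             column = column[::-1]
--         parts.append("".join(column))
--     return "".join(parts)
-- ===== Notes on version B (the rewrite author's own statement) =====
-- stated objective: alternative
-- what changed: B transposes the matrix once with zip(*matrix) and emits each of the three columns (reversed when its index is odd) as one join, instead of re-indexing matrix[i][j] cell by cell in two directions with string concatenation.
import Mathlib
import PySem

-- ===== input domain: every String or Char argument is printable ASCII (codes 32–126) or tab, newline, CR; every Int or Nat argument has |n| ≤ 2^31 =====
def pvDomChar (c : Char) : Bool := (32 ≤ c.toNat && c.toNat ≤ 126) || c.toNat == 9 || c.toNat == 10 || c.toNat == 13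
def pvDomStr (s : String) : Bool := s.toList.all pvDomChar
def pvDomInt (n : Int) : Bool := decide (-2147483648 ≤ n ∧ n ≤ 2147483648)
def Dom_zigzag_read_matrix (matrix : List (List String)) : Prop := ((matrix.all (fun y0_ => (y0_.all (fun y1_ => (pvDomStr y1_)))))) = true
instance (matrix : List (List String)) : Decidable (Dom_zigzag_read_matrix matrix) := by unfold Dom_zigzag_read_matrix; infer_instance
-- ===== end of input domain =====

-- B reads the three columns from the transposed table built once by zip(*matrix) (reversing odd columns),
-- instead of A's cell-by-cell zigzag re-indexing of matrix[i][j]; equivalence is proved on Pre_ (every row has ≥ 3 cells).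

-- ===== PORT A =====
-- literal port of A; matrix[i][j] is PySem.List.pyGetD (Python raises IndexError exactly where the
-- default would be used; those inputs are excluded by Pre_zigzag_read_matrix)
def zigzag_read_matrix (matrix : List (List String)) : String :=
  (PySem.List.pyRange 2 (-1) (-1)).foldl (fun result j =>
    if PySem.Int.mod j 2 = 0 then
      (PySem.List.pyRange 0 (matrix.length : Int) 1).foldl
        (fun r i => r ++ PySem.List.pyGetD (PySem.List.pyGetD matrix i []) j "") result
    else
      (PySem.List.pyRange ((matrix.length : Int) - 1) (-1) (-1)).foldl
        (fun r i => r ++ PySem.List.pyGetD (PySem.List.pyGetD matrix i []) j "") result) ""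

-- ===== PORT B =====
-- zip(*rows): truncating transpose, exactly Python's zip of the rows
def zipStar (rows : List (List String)) : List (List String) :=
  if h : rows.isEmpty || rows.any (·.isEmpty) then []
  else (rows.map (fun r => r.headD "")) :: zipStar (rows.map (fun r => r.tail))
termination_by (rows.headD []).length
decreasing_by
  cases rows with
  | nil => simp at h
  | cons a t =>
    simp only [List.isEmpty_cons, List.any_cons, Bool.or_eq_true, List.isEmpty_iff] at h
    simp only [not_or] at h
    simp only [List.headD_cons]
    cases a with
    | nil => exact absurd rfl h.2.1
    | cons c cs => simp

def zigzag_read_matrix_alt (matrix : List (List String)) : String :=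
  if matrix.isEmpty then "" else
  let cols := zipStar matrix
  let parts := ([2, 1, 0] : List Int).foldl (fun parts j =>
      let column := (PySem.List.pyGet? cols j).getD []   -- cols[j]; IndexError excluded by Pre_
      let column := if PySem.Int.mod j 2 ≠ 0 then (PySem.List.slice? column none none (-1)).getD [] else column
      parts ++ [PySem.Str.join "" column]) []
  PySem.Str.join "" parts

-- ===== PRECONDITION & SPEC =====
-- exactly the inputs where A returns (A indexes columns 2,1,0 of every row, so each row needs ≥ 3 cells)
def Pre_zigzag_read_matrix (matrix : List (List String)) : Prop :=
  ∀ row ∈ matrix, 3 ≤ row.length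
instance (matrix : List (List String)) : Decidable (Pre_zigzag_read_matrix matrix) := by
  unfold Pre_zigzag_read_matrix; infer_instance
def pvWitness_zigzag_read_matrix : List (List String) := [["a", "b", "c"], ["d", "e", "f", "g"]]

def Spec_zigzag_read_matrix (matrix : List (List String)) (out : String) : Prop := out = zigzag_read_matrix_alt matrix
instance (matrix : List (List String)) (out : String) : Decidable (Spec_zigzag_read_matrix matrix out) := by unfold Spec_zigzag_read_matrix; infer_instance

-- ===== CLAIM (what is proved, stated in full; the proofs are below) =====
def Claim_equal_zigzag_read_matrix : Prop := ∀ (matrix : List (List String)), Dom_zigzag_read_matrix matrix → Pre_zigzag_read_matrix matrix → Spec_zigzag_read_matrix matrix (zigzag_read_matrix matrix)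

-- ===== LEMMAS AND PROOFS =====

lemma str_join_nil_nil : PySem.Str.join "" ([] : List String) = "" := by
  rw [← String.toList_inj]; simp [PySem.Str.toList_join, PySem.Chars.join_nil]

-- ''.join of a cons, at the String level
lemma str_join_nil_cons (a : String) (l : List String) :
    PySem.Str.join "" (a :: l) = a ++ PySem.Str.join "" l := by
  rw [← String.toList_inj]
  cases l with
  | nil => simp [PySem.Str.toList_join, PySem.Chars.join_singleton, PySem.Chars.join_nil,
      String.toList_append]
  | cons b t => simp [PySem.Str.toList_join, PySem.Chars.join_cons_cons, String.toList_append]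

-- a 'result += g(x)' loop is the join of the mapped list
lemma foldl_str_append {α : Type} (g : α → String) (l : List α) (r : String) :
    l.foldl (fun r x => r ++ g x) r = r ++ PySem.Str.join "" (l.map g) := by
  induction l generalizing r with
  | nil => simp [str_join_nil_nil]
  | cons a t ih => simp only [List.foldl_cons, List.map_cons, ih, str_join_nil_cons,
      String.append_assoc]

-- the zigzag index list (range(n)) just enumerates the rows
lemma map_range_cells (ms : List (List String)) :
    (List.range ms.length).map (fun (k : Nat) => PySem.List.pyGetD ms ((k : Int)) []) = ms := by
  apply List.ext_getElem (by simp)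
  intro i h1 h2
  simp [PySem.List.pyGetD_natCast, List.getElem?_eq_getElem, h2]

-- map over the even-direction index range = map over the rows
lemma mapIdx_cells (ms : List (List String)) (j : Int) :
    (PySem.List.pyRange 0 (ms.length : Int) 1).map
      (fun i => PySem.List.pyGetD (PySem.List.pyGetD ms i []) j "")
    = ms.map (fun row => PySem.List.pyGetD row j "") := by
  rw [PySem.List.pyRange_zero_natCast, List.map_map]
  have : ((fun i => PySem.List.pyGetD (PySem.List.pyGetD ms i []) j "") ∘ fun (k : Nat) => (k : Int))
      = (fun row => PySem.List.pyGetD row j "") ∘ (fun k : Nat => PySem.List.pyGetD ms (k : Int) []) := rfl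
  rw [this, ← List.map_map, map_range_cells]

-- A's top-down column pass
lemma evenLoop (ms : List (List String)) (j : Int) (r : String) :
    (PySem.List.pyRange 0 (ms.length : Int) 1).foldl
      (fun r i => r ++ PySem.List.pyGetD (PySem.List.pyGetD ms i []) j "") r
    = r ++ PySem.Str.join "" (ms.map (fun row => PySem.List.pyGetD row j "")) := by
  rw [foldl_str_append, mapIdx_cells]

-- A's bottom-up column pass
lemma oddLoop (ms : List (List String)) (j : Int) (r : String) :
    (PySem.List.pyRange ((ms.length : Int) - 1) (-1) (-1)).foldl
      (fun r i => r ++ PySem.List.pyGetD (PySem.List.pyGetD ms i []) j "") r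
    = r ++ PySem.Str.join "" ((ms.map (fun row => PySem.List.pyGetD row j "")).reverse) := by
  rw [PySem.List.pyRange_neg_one_eq_reverse]
  have h : (-1 : Int) + 1 = 0 := by norm_num
  have h2 : (ms.length : Int) - 1 + 1 = (ms.length : Int) := by ring
  rw [h, h2, foldl_str_append, List.map_reverse, mapIdx_cells]

-- zip(*rows) column j, when every row is long enough
lemma zipStar_getElem? (j : Nat) (ms : List (List String)) (hne : ms ≠ [])
    (hlen : ∀ r ∈ ms, j < r.length) :
    (zipStar ms)[j]? = some (ms.map (fun r => r.getD j "")) := by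
  induction j generalizing ms with
  | zero =>
    rw [zipStar]
    rw [dif_neg (by
      simp only [Bool.or_eq_true, List.isEmpty_iff, List.any_eq_true, not_or]
      refine ⟨hne, ?_⟩
      rintro ⟨r, hr, hre⟩
      have := hlen r hr
      rw [hre] at this
      simp at this)]
    simp only [List.getElem?_cons_zero, Option.some.injEq]
    apply List.map_congr_left
    intro r _; cases r <;> simp
  | succ j ih =>
    rw [zipStar]
    rw [dif_neg (by
      simp only [Bool.or_eq_true, List.isEmpty_iff, List.any_eq_true, not_or]
      refine ⟨hne, ?_⟩
      rintro ⟨r, hr, hre⟩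
      have := hlen r hr
      rw [hre] at this
      simp at this)]
    rw [List.getElem?_cons_succ]
    rw [ih (ms.map (fun r => r.tail)) (by simpa using hne)
      (by intro r hr
          simp only [List.mem_map] at hr
          obtain ⟨r0, hr0, rfl⟩ := hr
          have := hlen r0 hr0
          simp [List.length_tail]; omega)]
    rw [List.map_map]
    congr 1
    apply List.map_congr_left
    intro r hr
    have := hlen r hr
    cases r with
    | nil => simp at this
    | cons a t => simp

-- B's value on a non-empty matrix, in closed form
lemma alt_closed (ms : List (List String)) (hne : ms ≠ [])
    (hlen : ∀ r ∈ ms, 3 ≤ r.length) :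
    zigzag_read_matrix_alt ms
    = PySem.Str.join "" [
        PySem.Str.join "" (ms.map (fun r => r.getD 2 "")),
        PySem.Str.join "" ((ms.map (fun r => r.getD 1 "")).reverse),
        PySem.Str.join "" (ms.map (fun r => r.getD 0 ""))] := by
  have hlen' : ∀ j : Nat, j < 3 → ∀ r ∈ ms, j < r.length :=
    fun j hj r hr => lt_of_lt_of_le hj (hlen r hr)
  unfold zigzag_read_matrix_alt
  rw [if_neg (by simpa [List.isEmpty_iff] using hne)]
  simp only [List.foldl_cons, List.foldl_nil]
  rw [PySem.List.pyGet?_of_nonneg (zipStar ms) (show (0:Int) ≤ 2 by norm_num)]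
  rw [PySem.List.pyGet?_of_nonneg (zipStar ms) (show (0:Int) ≤ 1 by norm_num)]
  rw [PySem.List.pyGet?_of_nonneg (zipStar ms) (show (0:Int) ≤ 0 by norm_num)]
  rw [show ((2:Int)).toNat = 2 from rfl, show ((1:Int)).toNat = 1 from rfl,
      show ((0:Int)).toNat = 0 from rfl]
  rw [zipStar_getElem? 2 ms hne (hlen' 2 (by norm_num)),
      zipStar_getElem? 1 ms hne (hlen' 1 (by norm_num)),
      zipStar_getElem? 0 ms hne (hlen' 0 (by norm_num))]
  simp only [Option.getD_some]
  rw [if_neg (by decide), if_pos (by decide), if_neg (by decide)]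
  rw [PySem.List.slice?_none_none_neg_one]
  simp

-- ===== VERDICT (by name: the statement is the Claim_ definition above) =====
theorem zigzag_read_matrix_spec : Claim_equal_zigzag_read_matrix := by
  intro matrix _ hpre
  unfold Spec_zigzag_read_matrix
  by_cases hm : matrix = []
  · subst hm; rfl
  · unfold zigzag_read_matrix
    rw [show PySem.List.pyRange 2 (-1) (-1) = [2, 1, 0] from by decide]
    simp only [List.foldl_cons, List.foldl_nil]
    rw [if_pos (by decide), if_neg (by decide), if_pos (by decide)]
    rw [evenLoop, oddLoop, evenLoop]
    rw [alt_closed matrix hm hpre]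
    have hcell : ∀ j : Nat, (fun row => PySem.List.pyGetD row (OfNat.ofNat j) "")
        = (fun row : List String => row.getD j "") := by
      intro j; funext row; exact PySem.List.pyGetD_ofNat' row j ""
    rw [str_join_nil_cons, str_join_nil_cons, str_join_nil_cons, str_join_nil_nil]
    simp [PySem.List.pyGetD_ofNat', String.append_assoc]
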